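-- pv_equiv track=rewrite | github.com/kushalsamanta/x-type-lig-lib | scripts/energy_force_component_distribution_before_filter.py | select_steps_for_folder
-- ===== SOURCE A (Python) =====
-- def select_steps_for_folder(entries, is_highest: bool):
--     def parse_step(e):
--         try:
--             return int(e.get("step", -1))
--         except Exception:
--             return -1
--
--     entries_sorted = sorted(entries, key=parse_step)
--     if not entries_sorted:
--         return []
--
--     if len(entries_sorted) < 10:
--         return [entries_sorted[-1]]
--
--     first_two_steps = {parse_step(entries_sorted[0]), parse_step(entries_sorted[1])}
--     selected, seen = [], set()
--     for e in entries_sorted: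
--         s = parse_step(e)
--         if s in (-1,): continue
--         if s in first_two_steps: continue
--         if s % 10 == 0 and s not in seen:
--             selected.append(e); seen.add(s)
--
--     if is_highest:
--         last_e = entries_sorted[-1]
--         if last_e not in selected:
--             selected.append(last_e)
--
--     return sorted(selected, key=parse_step)
-- ===== SOURCE B (Python) =====
-- def select_steps_for_folder(entries, is_highest: bool):
--     def parse_step(e):
--         try:
--             return int(e.get("step", -1))
--         except Exception:
--             return -1
--
--     if not entries:
--         return []
--     entries_sorted = sorted(entries, key=parse_step)
--     if len(entries_sorted) < 10:
--         return [entries_sorted[-1]]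
--
--     # index the UNSORTED input once: step -> first entry carrying it
--     steps = [parse_step(e) for e in entries]
--     first_by_step = {}
--     for e in entries:
--         first_by_step.setdefault(parse_step(e), e)
--
--     first_two = {parse_step(entries_sorted[0]), parse_step(entries_sorted[1])}
--     # assemble the answer over the key space, not by scanning entries
--     selected = [first_by_step[s] for s in sorted(set(steps))
--                 if s != -1 and s % 10 == 0 and s not in first_two]
--
--     if is_highest and entries_sorted[-1] not in selected:
--         selected.append(entries_sorted[-1])
--     return selected
-- ===== Notes on version B (the rewrite author's own statement) =====
-- stated objective: alternative
-- what changed: B replaces A's seen-set scan over the sorted entries by a step->first-entry dictionary built once over the unsorted input plus a comprehension over sorted(set(steps)): the selection is assembled on the key space (stable sort makes the first entry per step the first of each sorted group), the sort is only used for the guards and boundary elements, and no final re-sort is needed.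
import Mathlib
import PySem

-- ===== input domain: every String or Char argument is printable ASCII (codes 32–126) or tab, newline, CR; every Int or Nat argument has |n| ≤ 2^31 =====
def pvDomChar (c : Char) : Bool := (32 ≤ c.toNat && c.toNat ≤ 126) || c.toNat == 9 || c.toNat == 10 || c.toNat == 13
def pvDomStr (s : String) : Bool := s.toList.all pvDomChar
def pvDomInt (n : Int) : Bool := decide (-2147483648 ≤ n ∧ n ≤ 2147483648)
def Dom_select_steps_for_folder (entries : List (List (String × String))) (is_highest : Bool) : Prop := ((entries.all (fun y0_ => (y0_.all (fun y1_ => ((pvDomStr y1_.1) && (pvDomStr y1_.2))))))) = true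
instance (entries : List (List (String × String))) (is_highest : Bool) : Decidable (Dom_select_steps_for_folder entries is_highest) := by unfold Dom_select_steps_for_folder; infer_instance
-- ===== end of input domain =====

-- B builds a step→first-entry dictionary over the unsorted input and assembles the selection
-- as a comprehension over sorted(set(steps)) — key-space driven, no seen-set scan and no final
-- re-sort; objective: alternative (same asymptotic cost).


-- shared helpers: both Pythons define the identical parse_step; Python's `not in` on a list of
-- dicts uses dict value-equality, modelled by pyDictEq (same lookups in both directions)
def parseStep (e : List (String × String)) : Int :=
  match PySem.Dict.get? (PySem.Dict.mk e) "step" with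
  | none => -1
  | some v => (PySem.Int.ofStr? v).getD (-1)

def pyDictEq (a b : List (String × String)) : Bool :=
  (a.all (fun kv => PySem.Dict.get? (PySem.Dict.mk b) kv.1 == PySem.Dict.get? (PySem.Dict.mk a) kv.1)) &&
  (b.all (fun kv => PySem.Dict.get? (PySem.Dict.mk a) kv.1 == PySem.Dict.get? (PySem.Dict.mk b) kv.1))

-- ===== PORT A =====
-- A's loop body: skip -1, skip first_two, select when s % 10 == 0 and s not in the seen-set
def stepA (ft : PySem.Set Int) (st : List (List (String × String)) × PySem.Set Int)
    (e : List (String × String)) : List (List (String × String)) × PySem.Set Int :=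
  let s := parseStep e
  if s == -1 then st
  else if PySem.Set.contains ft s then st
  else if (PySem.Int.mod s 10 == 0) && !(PySem.Set.contains st.2 s) then
    (st.1 ++ [e], PySem.Set.add st.2 s)
  else st
def select_steps_for_folder (entries : List (List (String × String))) (is_highest : Bool) : List (List (String × String)) :=
  let es := PySem.List.sorted entries parseStep false
  if es = [] then []
  else if es.length < 10 then [(PySem.List.pyGet? es (-1)).getD []]
  else
    let ft := PySem.Set.add (PySem.Set.add PySem.Set.empty
                (parseStep ((PySem.List.pyGet? es 0).getD [])))
                (parseStep ((PySem.List.pyGet? es 1).getD []))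
    let r := es.foldl (stepA ft) ([], PySem.Set.empty)
    let sel :=
      if is_highest then
        let lastE := (PySem.List.pyGet? es (-1)).getD []
        if !(r.1.any (fun x => pyDictEq x lastE)) then r.1 ++ [lastE] else r.1
      else r.1
    PySem.List.sorted sel parseStep false

-- ===== PORT B =====
-- B: dictionary of first entry per step over the unsorted input; selection assembled from
-- sorted(set(steps)) (filter-then-map = the comprehension); sort only for guards and boundaries
def select_steps_for_folder_alt (entries : List (List (String × String))) (is_highest : Bool) : List (List (String × String)) :=
  if entries = [] then []
  else
    let es := PySem.List.sorted entries parseStep false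
    if es.length < 10 then [(PySem.List.pyGet? es (-1)).getD []]
    else
      let steps := entries.map parseStep
      let first := entries.foldl (fun d e => PySem.Dict.setdefault d (parseStep e) e) PySem.Dict.empty
      let ft := PySem.Set.add (PySem.Set.add PySem.Set.empty
                  (parseStep ((PySem.List.pyGet? es 0).getD [])))
                  (parseStep ((PySem.List.pyGet? es 1).getD []))
      let selected := ((PySem.List.sorted (PySem.Set.ofList steps) (fun x => x) false).filter
          (fun s => !(s == -1) && (PySem.Int.mod s 10 == 0) && !(PySem.Set.contains ft s))).map
          (fun s => (PySem.Dict.get? first s).getD [])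
      if is_highest && !(selected.any (fun x => pyDictEq x ((PySem.List.pyGet? es (-1)).getD []))) then
        selected ++ [(PySem.List.pyGet? es (-1)).getD []]
      else selected

-- ===== PRECONDITION & SPEC =====
def Spec_select_steps_for_folder (entries : List (List (String × String))) (is_highest : Bool) (out : List (List (String × String))) : Prop := out = select_steps_for_folder_alt entries is_highest
instance (entries : List (List (String × String))) (is_highest : Bool) (out : List (List (String × String))) : Decidable (Spec_select_steps_for_folder entries is_highest out) := by unfold Spec_select_steps_for_folder; infer_instance

-- ===== CLAIM (what is proved, stated in full; the proofs are below) =====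
def Claim_equal_select_steps_for_folder : Prop := ∀ (entries : List (List (String × String))) (is_highest : Bool), Dom_select_steps_for_folder entries is_highest → Spec_select_steps_for_folder entries is_highest (select_steps_for_folder entries is_highest)

-- ===== LEMMAS AND PROOFS =====

-- the combined selection test, in B's evaluation order
def passFt (ft : PySem.Set Int) (s : Int) : Bool :=
  !(s == -1) && (PySem.Int.mod s 10 == 0) && !(PySem.Set.contains ft s)

-- proof-side intermediate: the prev-key group scan over the sorted list
def stepB (ft : PySem.Set Int) (st : List (List (String × String)) × Option Int)
    (e : List (String × String)) : List (List (String × String)) × Option Int :=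
  if some (parseStep e) = st.2 then st
  else ((if passFt ft (parseStep e) then st.1 ++ [e] else st.1), some (parseStep e))

-- first entry of xs carrying step s
def firstIn (xs : List (List (String × String))) (s : Int) : List (String × String) :=
  ((xs.filter (fun e => parseStep e == s)).head?).getD []

lemma stepB_eq (ft : PySem.Set Int) (st : List (List (String × String)) × Option Int)
    (e : List (String × String)) :
    stepB ft st e = if some (parseStep e) = st.2 then st
      else ((if passFt ft (parseStep e) then st.1 ++ [e] else st.1), some (parseStep e)) := rfl

lemma firstIn_cons_self (e : List (String × String)) (t : List (List (String × String))) :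
    firstIn (e :: t) (parseStep e) = e := by
  unfold firstIn
  rw [List.filter_cons_of_pos (by simp)]
  rfl

lemma firstIn_cons_of_ne (e : List (String × String)) (t : List (List (String × String)))
    (s : Int) (h : parseStep e ≠ s) : firstIn (e :: t) s = firstIn t s := by
  unfold firstIn
  rw [List.filter_cons_of_neg (by simp [h])]

lemma stepA_eq (ft : PySem.Set Int) (st : List (List (String × String)) × PySem.Set Int)
    (e : List (String × String)) :
    stepA ft st e = if passFt ft (parseStep e) && !(PySem.Set.contains st.2 (parseStep e))
      then (st.1 ++ [e], PySem.Set.add st.2 (parseStep e)) else st := by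
  by_cases h1 : parseStep e = -1
  · simp [stepA, passFt, h1]
  · by_cases h2 : parseStep e ∈ ft
    · simp [stepA, passFt, h1, h2]
    · by_cases h3 : (10:Int) ∣ parseStep e
      · simp [stepA, passFt, h1, h2, h3]
      · simp [stepA, passFt, h1, h2, h3]

lemma loop_eq (ft : PySem.Set Int) :
    ∀ (l : List (List (String × String))) (acc : List (List (String × String)))
      (seen : PySem.Set Int) (p : Int),
      (l.map parseStep).Pairwise (· ≤ ·) →
      (∀ t ∈ seen, t ≤ p) →
      (p ∈ seen ↔ passFt ft p = true) →
      (∀ e ∈ l, p ≤ parseStep e) →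
      (l.foldl (stepA ft) (acc, seen)).1 = (l.foldl (stepB ft) (acc, some p)).1 := by
  intro l
  induction l with
  | nil => intro acc seen p _ _ _ _; rfl
  | cons e t ih =>
    intro acc seen p hpw hle hiff hbound
    rw [List.map_cons, List.pairwise_cons] at hpw
    obtain ⟨hhead, hpwt⟩ := hpw
    have hboundt : ∀ x ∈ t, parseStep e ≤ parseStep x := by
      intro x hx; exact hhead _ (List.mem_map_of_mem hx)
    simp only [List.foldl_cons, stepA_eq, stepB_eq]
    have hps : p ≤ parseStep e := hbound e (List.mem_cons_self ..)
    by_cases hsp : parseStep e = p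
    · -- same group: both sides skip
      have hcont : seen.contains p = passFt ft p := by
        by_cases hmem : p ∈ seen
        · rw [(PySem.Set.contains_iff seen p).mpr hmem, (hiff.mp hmem)]
        · have h1 : passFt ft p = false := by
            cases hpf : passFt ft p
            · rfl
            · exact absurd (hiff.mpr hpf) hmem
          have h2 : seen.contains p = false := by
            cases hc : seen.contains p
            · rfl
            · exact absurd ((PySem.Set.contains_iff seen p).mp hc) hmem
          rw [h1, h2]
      rw [hsp]
      simp only [hcont, Bool.and_not_self, Bool.false_eq_true, if_false]
      exact ih acc seen p hpwt hle hiff (fun x hx => hsp ▸ hboundt x hx)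
    · -- new group
      have hlt : p < parseStep e := lt_of_le_of_ne hps (fun h => hsp h.symm)
      have hnotseen : parseStep e ∉ seen := fun hmem => absurd (hle _ hmem) (not_le.mpr hlt)
      have hcont : seen.contains (parseStep e) = false := by
        cases hc : seen.contains (parseStep e)
        · rfl
        · exact absurd ((PySem.Set.contains_iff seen _).mp hc) hnotseen
      have hne : ¬ (some (parseStep e) = some p) := by simp [hsp]
      rw [if_neg hne]
      simp only [hcont, Bool.not_false, Bool.and_true]
      by_cases hpf : passFt ft (parseStep e) = true
      · rw [if_pos hpf, if_pos hpf]
        apply ih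
        · exact hpwt
        · intro x hx
          rcases (PySem.Set.mem_add seen (parseStep e) x).mp hx with hx' | hx'
          · exact le_of_lt (lt_of_le_of_lt (hle _ hx') hlt)
          · exact le_of_eq hx'
        · constructor
          · intro _; exact hpf
          · intro _; exact (PySem.Set.mem_add seen (parseStep e) (parseStep e)).mpr (Or.inr rfl)
        · exact hboundt
      · rw [if_neg hpf, if_neg hpf]
        apply ih
        · exact hpwt
        · intro x hx; exact le_of_lt (lt_of_le_of_lt (hle _ hx) hlt)
        · constructor
          · intro hmem; exact absurd hmem hnotseen
          · intro hc; exact absurd hc hpf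
        · exact hboundt

lemma loop_eq_start (ft : PySem.Set Int) (l : List (List (String × String))) :
    (l.map parseStep).Pairwise (· ≤ ·) →
    (l.foldl (stepA ft) ([], PySem.Set.empty)).1 = (l.foldl (stepB ft) ([], none)).1 := by
  cases l with
  | nil => intro _; rfl
  | cons e t =>
    intro hpw
    rw [List.map_cons, List.pairwise_cons] at hpw
    obtain ⟨hhead, hpwt⟩ := hpw
    simp only [List.foldl_cons, stepA_eq, stepB_eq]
    have hcont : PySem.Set.contains PySem.Set.empty (parseStep e) = false := rfl
    have hne : ¬ (some (parseStep e) = none) := by simp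
    rw [if_neg hne]
    simp only [hcont, Bool.not_false, Bool.and_true]
    have hboundt : ∀ x ∈ t, parseStep e ≤ parseStep x := by
      intro x hx; exact hhead _ (List.mem_map_of_mem hx)
    by_cases hpf : passFt ft (parseStep e) = true
    · rw [if_pos hpf, if_pos hpf]
      apply loop_eq ft t _ _ _ hpwt
      · intro x hx
        rcases (PySem.Set.mem_add PySem.Set.empty (parseStep e) x).mp hx with hx' | hx'
        · exact absurd hx' (List.not_mem_nil)
        · exact le_of_eq hx'
      · constructor
        · intro _; exact hpf
        · intro _; exact (PySem.Set.mem_add PySem.Set.empty (parseStep e) (parseStep e)).mpr (Or.inr rfl)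
      · exact hboundt
    · rw [if_neg hpf, if_neg hpf]
      apply loop_eq ft t _ _ _ hpwt
      · intro x hx; exact absurd hx (List.not_mem_nil)
      · constructor
        · intro hmem; exact absurd hmem (List.not_mem_nil)
        · intro hc; exact absurd hc hpf
      · exact hboundt

lemma loopB_sublist (ft : PySem.Set Int) :
    ∀ (l : List (List (String × String))) (acc : List (List (String × String))) (p : Option Int),
      ∃ sub, (l.foldl (stepB ft) (acc, p)).1 = acc ++ sub ∧ sub.Sublist l := by
  intro l
  induction l with
  | nil => intro acc p; exact ⟨[], by simp, List.Sublist.refl []⟩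
  | cons e t ih =>
    intro acc p
    rw [List.foldl_cons, stepB_eq]
    by_cases h1 : some (parseStep e) = p
    · rw [if_pos h1]
      obtain ⟨sub, h, hs⟩ := ih acc p
      exact ⟨sub, h, hs.cons e⟩
    · rw [if_neg h1]
      by_cases h2 : passFt ft (parseStep e) = true
      · rw [if_pos h2]
        obtain ⟨sub, h, hs⟩ := ih (acc ++ [e]) (some (parseStep e))
        exact ⟨e :: sub, by simpa using h, hs.cons₂ e⟩
      · rw [if_neg h2]
        obtain ⟨sub, h, hs⟩ := ih acc (some (parseStep e))
        exact ⟨sub, h, hs.cons e⟩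

-- the first-occurrence dictionary: lookup = head of the filter
lemma dict_first_get (s : Int) :
    ∀ (l : List (List (String × String))) (d : PySem.Dict Int (List (String × String))),
      ((l.foldl (fun d e => PySem.Dict.setdefault d (parseStep e) e) d).get? s)
        = (d.get? s).or ((l.filter (fun e => parseStep e == s)).head?) := by
  intro l
  induction l with
  | nil => intro d; simp
  | cons e t ih =>
    intro d
    rw [List.foldl_cons, ih]
    by_cases hk : parseStep e = s
    · subst hk
      rw [PySem.Dict.get?_setdefault_self]
      cases hd : d.get? (parseStep e) with
      | none => simp
      | some v => simp
    · rw [PySem.Dict.get?_setdefault_of_ne _ _ (fun h => hk h.symm)]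
      simp [hk]

-- stability of the PySem insertion sort: the entries carrying one step value keep their order
lemma insertBy_filter (s : Int) (x : List (String × String)) :
    ∀ (ys : List (List (String × String))), ((ys.map parseStep).Pairwise (· ≤ ·)) →
      (PySem.List.insertBy (fun a b => decide (parseStep a < parseStep b)) x ys).filter
          (fun e => parseStep e == s)
        = ys.filter (fun e => parseStep e == s)
            ++ (if parseStep x == s then [x] else []) := by
  intro ys
  induction ys with
  | nil => intro _; by_cases h : parseStep x = s <;> simp [PySem.List.insertBy, h]
  | cons y t ih =>
    intro hpw
    rw [List.map_cons, List.pairwise_cons] at hpw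
    obtain ⟨hy, hpwt⟩ := hpw
    show (if decide (parseStep x < parseStep y) = true then x :: y :: t
          else y :: PySem.List.insertBy _ x t).filter _ = _
    by_cases hlt : parseStep x < parseStep y
    · rw [if_pos (by simpa using hlt)]
      by_cases hxs : parseStep x = s
      · have hempty : (y :: t).filter (fun e => parseStep e == s) = [] := by
          rw [List.filter_eq_nil_iff]
          intro a ha
          have : parseStep y ≤ parseStep a := by
            rcases List.mem_cons.mp ha with rfl | ha'
            · exact le_refl _
            · exact hy _ (List.mem_map_of_mem ha')
          have : s < parseStep a := lt_of_lt_of_le (hxs ▸ hlt) this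
          simp [ne_of_gt this]
        rw [List.filter_cons_of_pos (by simp [hxs]), hempty]
        simp [hxs]
      · rw [List.filter_cons_of_neg (by simp [hxs])]
        simp [hxs]
    · rw [if_neg (by simpa using hlt)]
      by_cases hys : parseStep y = s
      · rw [List.filter_cons_of_pos (by simp [hys]), List.filter_cons_of_pos (by simp [hys]),
          ih hpwt, List.cons_append]
      · rw [List.filter_cons_of_neg (by simp [hys]), List.filter_cons_of_neg (by simp [hys]),
          ih hpwt]

lemma sorted_filter_eq (s : Int) (xs : List (List (String × String))) :
    (PySem.List.sorted xs parseStep false).filter (fun e => parseStep e == s)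
      = xs.filter (fun e => parseStep e == s) := by
  induction xs using List.reverseRecOn with
  | nil => rfl
  | append_singleton l x ih =>
    have hstep : PySem.List.sorted (l ++ [x]) parseStep false
        = PySem.List.insertBy (fun a b => decide (parseStep a < parseStep b)) x
            (PySem.List.sorted l parseStep false) := by
      rw [PySem.List.sorted_eq_foldl_insertBy, PySem.List.sorted_eq_foldl_insertBy,
        List.foldl_append, List.foldl_cons, List.foldl_nil]
    rw [hstep, insertBy_filter s x _ (PySem.List.sorted_map_key_pairwise l parseStep), ih,
      List.filter_append]
    by_cases h : parseStep x = s <;> simp [h]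

-- dedup facts
lemma discard_ofList (x : Int) :
    ∀ (l : List Int), PySem.Set.discard (PySem.Set.ofList l) x
      = PySem.Set.ofList (l.filter (fun y => !(y == x))) := by
  intro l
  induction l using List.reverseRecOn with
  | nil => rfl
  | append_singleton t a ih =>
    rw [PySem.Set.ofList_append_singleton, List.filter_append]
    by_cases hax : a = x
    · subst hax
      rw [List.filter_cons_of_neg (by simp), List.filter_nil, List.append_nil]
      rw [PySem.Set.add_eq_ite]
      by_cases hm : a ∈ PySem.Set.ofList t
      · rw [if_pos hm, ih]
      · rw [if_neg hm]
        show (PySem.Set.ofList t ++ [a]).filter _ = _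
        rw [List.filter_append, List.filter_cons_of_neg (by simp), List.filter_nil, List.append_nil]
        exact ih
    · rw [List.filter_cons_of_pos (by simp [hax]), List.filter_nil,
        PySem.Set.ofList_append_singleton, ← ih, PySem.Set.add_eq_ite]
      by_cases hm : a ∈ PySem.Set.ofList t
      · have hmem : a ∈ PySem.Set.discard (PySem.Set.ofList t) x :=
          (PySem.Set.mem_discard _ _ _).mpr ⟨hm, hax⟩
        rw [if_pos hm, PySem.Set.add_of_mem hmem]
      · have hnm : a ∉ PySem.Set.discard (PySem.Set.ofList t) x := by
          intro hmem
          exact hm ((PySem.Set.mem_discard _ _ _).mp hmem).1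
        rw [if_neg hm, PySem.Set.add_of_not_mem hnm]
        show (PySem.Set.ofList t ++ [a]).filter _ = _
        rw [List.filter_append, List.filter_cons_of_pos (by simp [hax]), List.filter_nil]
        rfl

lemma ofList_sublist (l : List Int) : (PySem.Set.ofList l).Sublist l := by
  induction l using List.reverseRecOn with
  | nil => exact List.Sublist.refl []
  | append_singleton t a ih =>
    rw [PySem.Set.ofList_append_singleton, PySem.Set.add_eq_ite]
    by_cases hm : a ∈ PySem.Set.ofList t
    · rw [if_pos hm]
      exact ih.trans (List.sublist_append_left t [a])
    · rw [if_neg hm]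
      exact ih.append (List.Sublist.refl [a])

lemma dedup_pairwise_lt (ks : List Int) (h : ks.Pairwise (· ≤ ·)) :
    (PySem.List.dedup ks).Pairwise (· < ·) := by
  have hle : (PySem.List.dedup ks).Pairwise (· ≤ ·) := h.sublist (ofList_sublist ks)
  have hnd : (PySem.List.dedup ks).Nodup := PySem.Set.nodup_ofList ks
  exact (hnd.and hle).imp (fun ⟨hne, hle⟩ => lt_of_le_of_ne hle hne)

-- sorted(set(steps)) is the ordered dedup of the sorted key list
lemma sortedKeys_eq (entries : List (List (String × String))) :
    PySem.List.sorted (PySem.Set.ofList (entries.map parseStep)) (fun x => x) false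
      = PySem.List.dedup ((PySem.List.sorted entries parseStep false).map parseStep) := by
  have hpwL := PySem.List.sorted_ofList_pairwise_lt (entries.map parseStep)
  have hpwR := dedup_pairwise_lt _ (PySem.List.sorted_map_key_pairwise entries parseStep)
  have hmem : ∀ s : Int,
      s ∈ PySem.List.sorted (PySem.Set.ofList (entries.map parseStep)) (fun x => x) false
      ↔ s ∈ PySem.List.dedup ((PySem.List.sorted entries parseStep false).map parseStep) := by
    intro s
    simp [PySem.List.mem_sorted, PySem.Set.mem_ofList, PySem.List.dedup]
  have hperm : (PySem.List.sorted (PySem.Set.ofList (entries.map parseStep)) (fun x => x) false).Perm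
      (PySem.List.dedup ((PySem.List.sorted entries parseStep false).map parseStep)) := by
    apply (List.perm_ext_iff_of_nodup _ _).mpr hmem
    · exact hpwL.nodup
    · exact hpwR.nodup
  exact PySem.List.eq_of_perm_of_pairwise_le_of_injective (fun x => x)
    (fun a b h => h) hperm (hpwL.imp le_of_lt) (hpwR.imp le_of_lt)

-- the group scan over the sorted list = map over its deduplicated key list
lemma groupFold (ft : PySem.Set Int) :
    ∀ (t : List (List (String × String))) (acc : List (List (String × String))) (p : Int),
      ((t.map parseStep).Pairwise (· ≤ ·)) →
      (∀ e ∈ t, p ≤ parseStep e) →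
      (t.foldl (stepB ft) (acc, some p)).1
        = acc ++ ((PySem.List.dedup ((t.map parseStep).filter (fun s => !(s == p)))).filter
            (passFt ft)).map (firstIn t) := by
  intro t
  induction t with
  | nil => intro acc p _ _; simp [PySem.List.dedup]
  | cons e t ih =>
    intro acc p hpw hbound
    rw [List.map_cons, List.pairwise_cons] at hpw
    obtain ⟨hhead, hpwt⟩ := hpw
    have hboundt : ∀ x ∈ t, parseStep e ≤ parseStep x := by
      intro x hx; exact hhead _ (List.mem_map_of_mem hx)
    rw [List.foldl_cons, stepB_eq]
    simp only [PySem.List.dedup] at ih ⊢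
    by_cases hsp : parseStep e = p
    · rw [if_pos (by simp [hsp])]
      rw [ih acc p hpwt (fun x hx => hsp ▸ hboundt x hx)]
      rw [List.map_cons, List.filter_cons_of_neg (by simp [hsp])]
      congr 1
      apply List.map_congr_left
      intro s hs
      have hsne : s ≠ p := by
        have := List.mem_filter.mp ((PySem.Set.mem_ofList _ _).mp (List.mem_filter.mp hs).1)
        simpa using this.2
      exact (firstIn_cons_of_ne e t s (fun h => hsne (h ▸ hsp))).symm
    · have hplt : p < parseStep e :=
        lt_of_le_of_ne (hbound e (List.mem_cons_self ..)) (fun h => hsp h.symm)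
      rw [if_neg (by simp [hsp])]
      rw [ih _ (parseStep e) hpwt hboundt]
      have hfilt_t : (t.map parseStep).filter (fun s => !(s == p)) = t.map parseStep := by
        apply List.filter_eq_self.mpr
        intro s hs
        obtain ⟨x, hx, rfl⟩ := List.mem_map.mp hs
        simp [ne_of_gt (lt_of_lt_of_le hplt (hboundt x hx))]
      rw [List.map_cons, List.filter_cons_of_pos (by simp [ne_of_gt hplt]), hfilt_t]
      rw [PySem.Set.ofList_cons, discard_ofList]
      have hmap_eq : ∀ D : List Int, (∀ s ∈ D, s ≠ parseStep e) →
          D.map (firstIn (e :: t)) = D.map (firstIn t) := by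
        intro D hD
        apply List.map_congr_left
        intro s hs
        exact firstIn_cons_of_ne e t s (fun h => hD s hs h.symm)
      by_cases hpf : passFt ft (parseStep e) = true
      · rw [if_pos hpf, List.filter_cons_of_pos hpf, List.map_cons, firstIn_cons_self]
        rw [hmap_eq _ (fun s hs => by
          have := List.mem_filter.mp ((PySem.Set.mem_ofList _ _).mp (List.mem_filter.mp hs).1)
          simpa using this.2)]
        simp
      · rw [if_neg hpf, List.filter_cons_of_neg (by simp [hpf])]
        rw [hmap_eq _ (fun s hs => by
          have := List.mem_filter.mp ((PySem.Set.mem_ofList _ _).mp (List.mem_filter.mp hs).1)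
          simpa using this.2)]

lemma groupFold_start (ft : PySem.Set Int) (l : List (List (String × String))) :
    ((l.map parseStep).Pairwise (· ≤ ·)) →
    (l.foldl (stepB ft) ([], none)).1
      = ((PySem.List.dedup (l.map parseStep)).filter (passFt ft)).map (firstIn l) := by
  cases l with
  | nil => intro _; rfl
  | cons e t =>
    intro hpw
    rw [List.map_cons, List.pairwise_cons] at hpw
    obtain ⟨hhead, hpwt⟩ := hpw
    have hboundt : ∀ x ∈ t, parseStep e ≤ parseStep x := by
      intro x hx; exact hhead _ (List.mem_map_of_mem hx)
    rw [List.foldl_cons, stepB_eq]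
    rw [if_neg (by simp)]
    rw [groupFold ft t _ (parseStep e) hpwt hboundt]
    simp only [PySem.List.dedup]
    rw [List.map_cons, PySem.Set.ofList_cons, discard_ofList]
    have hmap_eq : ∀ D : List Int, (∀ s ∈ D, s ≠ parseStep e) →
        D.map (firstIn (e :: t)) = D.map (firstIn t) := by
      intro D hD
      apply List.map_congr_left
      intro s hs
      exact firstIn_cons_of_ne e t s (fun h => hD s hs h.symm)
    by_cases hpf : passFt ft (parseStep e) = true
    · rw [if_pos hpf, List.filter_cons_of_pos hpf, List.map_cons, firstIn_cons_self]
      rw [hmap_eq _ (fun s hs => by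
        have := List.mem_filter.mp ((PySem.Set.mem_ofList _ _).mp (List.mem_filter.mp hs).1)
        simpa using this.2)]
      simp
    · rw [if_neg hpf, List.filter_cons_of_neg (by simp [hpf])]
      rw [hmap_eq _ (fun s hs => by
        have := List.mem_filter.mp ((PySem.Set.mem_ofList _ _).mp (List.mem_filter.mp hs).1)
        simpa using this.2)]
      simp

lemma pyGet_neg_one (l : List (List (String × String))) (h : l ≠ []) :
    (PySem.List.pyGet? l (-1)).getD [] = l.getLast h := by
  have hl : 1 ≤ l.length := List.length_pos_iff.mpr h
  simp [PySem.List.pyGet?, PySem.List.pyIdx?, hl,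
    List.getElem?_eq_getElem (by omega : l.length - 1 < l.length)]
  exact (List.getLast_eq_getElem h).symm

lemma le_getLast_of_pairwise : ∀ (l : List Int), l.Pairwise (· ≤ ·) →
    ∀ (h : l ≠ []) (a : Int), a ∈ l → a ≤ l.getLast h := by
  intro l hp h a ha
  obtain ⟨i, hi, rfl⟩ := List.mem_iff_getElem.mp ha
  rw [List.getLast_eq_getElem]
  rcases Nat.lt_or_ge i (l.length - 1) with hlt | hge
  · exact (List.pairwise_iff_getElem.mp hp) i (l.length - 1) hi (by omega) hlt
  · have : i = l.length - 1 := by omega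
    simp [this]

lemma ab_eq : ∀ (entries : List (List (String × String))) (is_highest : Bool),
    select_steps_for_folder entries is_highest = select_steps_for_folder_alt entries is_highest := by
  intro entries is_highest
  unfold select_steps_for_folder select_steps_for_folder_alt
  dsimp only
  set es := PySem.List.sorted entries parseStep false with hes
  have hpw : (es.map parseStep).Pairwise (· ≤ ·) :=
    PySem.List.sorted_map_key_pairwise entries parseStep
  by_cases h0 : es = []
  · have hent : entries = [] := (PySem.List.sorted_eq_nil_iff entries parseStep false).mp h0
    simp [h0, hent]
  · have hent : entries ≠ [] :=
      fun h => h0 ((PySem.List.sorted_eq_nil_iff entries parseStep false).mpr h)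
    have h0len : 0 < es.length := List.length_pos_iff.mpr h0
    rw [if_neg h0, if_neg hent]
    by_cases h10 : es.length < 10
    · rw [if_pos h10, if_pos h10]
    · rw [if_neg h10, if_neg h10]
      set ft := PySem.Set.add (PySem.Set.add PySem.Set.empty
                  (parseStep ((PySem.List.pyGet? es 0).getD [])))
                  (parseStep ((PySem.List.pyGet? es 1).getD [])) with hft
      have hsel : (es.foldl (stepA ft) ([], PySem.Set.empty)).1
          = (es.foldl (stepB ft) ([], none)).1 := loop_eq_start ft es hpw
      -- B's selection equals the group scan, hence A's fold
      have hBsel : ((PySem.List.sorted (PySem.Set.ofList (entries.map parseStep)) (fun x => x) false).filter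
            (fun s => !(s == -1) && (PySem.Int.mod s 10 == 0) && !(PySem.Set.contains ft s))).map
            (fun s => (PySem.Dict.get?
              (entries.foldl (fun d e => PySem.Dict.setdefault d (parseStep e) e) PySem.Dict.empty) s).getD [])
          = (es.foldl (stepB ft) ([], none)).1 := by
        rw [groupFold_start ft es hpw, sortedKeys_eq entries]
        show ((PySem.List.dedup (es.map parseStep)).filter (passFt ft)).map _ = _
        apply List.map_congr_left
        intro s _
        rw [dict_first_get s entries PySem.Dict.empty]
        show (((entries.filter (fun e => parseStep e == s)).head?).getD []) = firstIn es s
        unfold firstIn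
        rw [hes, sorted_filter_eq s entries]
      rw [hBsel, hsel]
      obtain ⟨sub, hsub, hsl⟩ := loopB_sublist ft es [] none
      set sel := (es.foldl (stepB ft) ([], none)).1 with hselB
      have hsubeq : sel = sub := by simpa using hsub
      have hpwsel : sel.Pairwise (fun a b => parseStep a ≤ parseStep b) := by
        rw [hsubeq]
        exact List.pairwise_map.mp (hpw.sublist (hsl.map parseStep))
      have hlastle : ∀ x ∈ sel, parseStep x ≤ parseStep ((PySem.List.pyGet? es (-1)).getD []) := by
        intro x hx
        rw [pyGet_neg_one es h0, ← List.getLast_map (f := parseStep) (by simp [h0])]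
        exact le_getLast_of_pairwise _ hpw _ _ (List.mem_map_of_mem (hsl.subset (hsubeq ▸ hx)))
      have hpwapp : (sel ++ [(PySem.List.pyGet? es (-1)).getD []]).Pairwise
          (fun a b => parseStep a ≤ parseStep b) := by
        rw [List.pairwise_append]
        exact ⟨hpwsel, List.pairwise_singleton _ _, by
          intro x hx y hy; rw [List.mem_singleton] at hy; rw [hy]; exact hlastle x hx⟩
      cases is_highest with
      | false =>
        simp only [Bool.false_and, if_neg (Bool.false_ne_true)]
        exact PySem.List.sorted_eq_self_of_pairwise sel parseStep hpwsel
      | true =>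
        simp only [Bool.true_and]
        by_cases hany : (sel.any (fun x => pyDictEq x ((PySem.List.pyGet? es (-1)).getD []))) = true
        · simp only [hany, Bool.not_true, if_neg (Bool.false_ne_true)]
          exact PySem.List.sorted_eq_self_of_pairwise sel parseStep hpwsel
        · rw [Bool.not_eq_true] at hany
          simp only [hany, Bool.not_false]
          exact PySem.List.sorted_eq_self_of_pairwise _ parseStep hpwapp

-- ===== VERDICT (by name: the statement is the Claim_ definition above) =====
theorem select_steps_for_folder_spec : Claim_equal_select_steps_for_folder := by
  intro entries is_highest _
  unfold Spec_select_steps_for_folder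
  exact ab_eq entries is_highest
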